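-- pv_equiv track=rewrite | github.com/DaviCMachado/T1_comunicacao | encode.py | pseudoternario
-- ===== SOURCE A (Python) =====
-- def pseudoternario(bits):
--     tempo, sinal = [], []
--     nivel = 1
--     t = 0
--     for bit in bits:
--         tempo += [t, t + 1]
--         if bit == '0':
--             sinal += [nivel] * 2
--             nivel *= -1
--         else:
--             sinal += [0] * 2
--         t += 1
--     return tempo, sinal
-- ===== SOURCE B (Python) =====
-- def pseudoternario(bits):
--     bs = list(bits)
--     n = len(bs)
--     tempo = [x for t in range(n) for x in (t, t + 1)]
--     zeros = [p for p, b in enumerate(bs) if b == '0']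
--     sinal = [0] * (2 * n)
--     for k, p in enumerate(zeros):
--         v = 1 if k % 2 == 0 else -1
--         sinal[2 * p] = v
--         sinal[2 * p + 1] = v
--     return tempo, sinal
-- ===== Notes on version B (the rewrite author's own statement) =====
-- stated objective: alternative
-- what changed: Replaces A's single loop with a mutable level flip by two passes: a comprehension builds tempo, the zero-bit positions are collected once, and a parity-driven fill (sign +1 for even zero-index, -1 for odd) writes both slots of each zero position into a preallocated all-zero signal list.
import Mathlib
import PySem

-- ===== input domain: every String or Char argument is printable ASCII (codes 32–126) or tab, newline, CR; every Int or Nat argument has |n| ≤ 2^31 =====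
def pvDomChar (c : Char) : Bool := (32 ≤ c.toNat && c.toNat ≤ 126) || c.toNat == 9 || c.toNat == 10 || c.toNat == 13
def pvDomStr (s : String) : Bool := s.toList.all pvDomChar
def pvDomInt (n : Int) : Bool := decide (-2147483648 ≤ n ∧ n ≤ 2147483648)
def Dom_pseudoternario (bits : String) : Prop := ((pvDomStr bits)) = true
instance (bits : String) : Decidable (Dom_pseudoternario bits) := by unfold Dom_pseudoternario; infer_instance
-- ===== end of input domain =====

-- B replaces A's single loop with its mutable level flip by two passes: a comprehension for tempo
-- plus a parity-driven fill over the collected zero positions (objective: alternative decomposition).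

-- ===== PORT A =====
-- A's loop body, named so the fold below stays a literal transcription of A's for-loop
def stepA (st : List Int × List Int × Int × Int) (bit : Char) : List Int × List Int × Int × Int :=
  let (tempo, sinal, nivel, t) := st
  let tempo := tempo ++ [t, t + 1]
  if bit = '0' then
    (tempo, sinal ++ [nivel, nivel], nivel * -1, t + 1)
  else
    (tempo, sinal ++ [0, 0], nivel, t + 1)

def pseudoternario (bits : String) : List Int × List Int :=
  let st := bits.toList.foldl stepA ([], [], 1, 0)
  (st.1, st.2.1)

-- ===== PORT B =====
-- zero positions from enumerate are nonnegative Ints; Python's list assignment sinal[i] = v is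
-- `set i.toNat v` (exact here: the indices 2*p and 2*p+1 are always nonnegative and in range)
def pseudoternario_alt (bits : String) : List Int × List Int :=
  let bs := bits.toList
  let n := bs.length
  let tempo := (List.range n).flatMap (fun (t : Nat) => [(t : Int), (t : Int) + 1])
  let zeros := (PySem.List.enumerate bs 0).filterMap
    (fun pb => if pb.2 = '0' then some pb.1 else none)
  let sinal := (PySem.List.enumerate zeros 0).foldl
    (fun acc kp =>
      let v : Int := if kp.1 % 2 == 0 then 1 else -1
      (acc.set (2 * kp.2).toNat v).set (2 * kp.2 + 1).toNat v)
    (List.replicate (2 * n) (0 : Int))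
  (tempo, sinal)

-- ===== PRECONDITION & SPEC =====
def Spec_pseudoternario (bits : String) (out : List Int × List Int) : Prop := out = pseudoternario_alt bits
instance (bits : String) (out : List Int × List Int) : Decidable (Spec_pseudoternario bits out) := by unfold Spec_pseudoternario; infer_instance

-- ===== CLAIM (what is proved, stated in full; the proofs are below) =====
def Claim_equal_pseudoternario : Prop := ∀ (bits : String), Dom_pseudoternario bits → Spec_pseudoternario bits (pseudoternario bits)

-- ===== LEMMAS AND PROOFS =====

-- tempo of A's loop depends only on the start time and the number of bits
def tempoN (t : Int) : Nat → List Int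
  | 0 => []
  | n + 1 => t :: (t + 1) :: tempoN (t + 1) n

-- sinal of A's loop as structural recursion over the bits
def sinalRec (nv : Int) : List Char → List Int
  | [] => []
  | c :: cs => if c = '0' then nv :: nv :: sinalRec (-nv) cs else 0 :: 0 :: sinalRec nv cs

-- positions (from offset s) of the '0' characters
def zposI (s : Int) : List Char → List Int
  | [] => []
  | c :: cs => if c = '0' then s :: zposI (s + 1) cs else zposI (s + 1) cs

theorem tempoB_eq (n : Nat) : ∀ (t : Int),
    (List.range n).flatMap (fun (i : Nat) => [t + (i : Int), t + (i : Int) + 1]) = tempoN t n := by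
  induction n with
  | zero => intro t; simp [tempoN]
  | succ n ih =>
    intro t
    rw [List.range_succ_eq_map, List.flatMap_cons, List.flatMap_map]
    have hf : (fun (a : Nat) => [t + ((a.succ : Nat) : Int), t + ((a.succ : Nat) : Int) + 1])
        = (fun (a : Nat) => [(t + 1) + (a : Int), (t + 1) + (a : Int) + 1]) := by
      funext a; push_cast; ring_nf
    rw [hf, ih (t + 1)]
    simp [tempoN]

theorem foldA_eq (cs : List Char) : ∀ (tempo sinal : List Int) (nivel t : Int),
    (cs.foldl stepA (tempo, sinal, nivel, t)).1 = tempo ++ tempoN t cs.length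
    ∧ (cs.foldl stepA (tempo, sinal, nivel, t)).2.1 = sinal ++ sinalRec nivel cs := by
  induction cs with
  | nil => intro tempo sinal nivel t; simp [tempoN, sinalRec]
  | cons c cs ih =>
    intro tempo sinal nivel t
    rw [List.foldl_cons]
    by_cases hc : c = '0'
    · have hstep : stepA (tempo, sinal, nivel, t) c
          = (tempo ++ [t, t + 1], sinal ++ [nivel, nivel], nivel * -1, t + 1) := by
        simp [stepA, hc]
      rw [hstep]
      have h := ih (tempo ++ [t, t + 1]) (sinal ++ [nivel, nivel]) (nivel * -1) (t + 1)
      refine ⟨?_, ?_⟩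
      · rw [h.1]; simp [tempoN]
      · rw [h.2]; simp [sinalRec, hc]
    · have hstep : stepA (tempo, sinal, nivel, t) c
          = (tempo ++ [t, t + 1], sinal ++ [0, 0], nivel, t + 1) := by
        simp [stepA, hc]
      rw [hstep]
      have h := ih (tempo ++ [t, t + 1]) (sinal ++ [0, 0]) nivel (t + 1)
      refine ⟨?_, ?_⟩
      · rw [h.1]; simp [tempoN]
      · rw [h.2]; simp [sinalRec, hc]

theorem zerosB_eq (cs : List Char) : ∀ (s : Int),
    (PySem.List.enumerate cs s).filterMap (fun pb => if pb.2 = '0' then some pb.1 else none)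
      = zposI s cs := by
  induction cs with
  | nil => intro s; simp [PySem.List.enumerate_nil, zposI]
  | cons c cs ih =>
    intro s
    rw [PySem.List.enumerate_cons]
    by_cases hc : c = '0' <;> simp [hc, zposI, ih]

-- sign of the k-th zero: +1 for even k, −1 for odd k; flips with k+1
theorem sign_flip (k : Int) :
    (if (k + 1) % 2 == 0 then (1 : Int) else -1) = -(if k % 2 == 0 then (1 : Int) else -1) := by
  by_cases h : k % 2 = 0
  · have h1 : (k + 1) % 2 = 1 := by omega
    simp [h, h1]
  · have h1 : (k + 1) % 2 = 0 := by omega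
    have h2 : ¬ ((k % 2 == 0) = true) := by simpa using h
    simp [h1, h2]

theorem fillB_eq (cs : List Char) : ∀ (s k : Int) (s0 : List Int),
    0 ≤ s → s0.length = (2 * s).toNat →
    (PySem.List.enumerate (zposI s cs) k).foldl
      (fun acc kp =>
        let v : Int := if kp.1 % 2 == 0 then 1 else -1
        (acc.set (2 * kp.2).toNat v).set (2 * kp.2 + 1).toNat v)
      (s0 ++ List.replicate (2 * cs.length) 0)
    = s0 ++ sinalRec (if k % 2 == 0 then 1 else -1) cs := by
  induction cs with
  | nil => intro s k s0 _ _; simp [zposI, PySem.List.enumerate_nil, sinalRec]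
  | cons c cs ih =>
    intro s k s0 hs hlen
    have hrep : List.replicate (2 * (c :: cs).length) (0 : Int)
        = 0 :: 0 :: List.replicate (2 * cs.length) 0 := by
      rw [show 2 * (c :: cs).length = (2 * cs.length) + 1 + 1 by simp; ring]
      simp [List.replicate_succ]
    by_cases hc : c = '0'
    · rw [show zposI s (c :: cs) = s :: zposI (s + 1) cs by simp [zposI, hc],
          PySem.List.enumerate_cons, List.foldl_cons]
      set v : Int := if k % 2 == 0 then 1 else -1 with hv
      have h2s : (2 * s).toNat = s0.length := hlen.symm
      have h2s1 : (2 * s + 1).toNat = s0.length + 1 := by omega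
      have hset :
          (((s0 ++ List.replicate (2 * (c :: cs).length) (0 : Int)).set (2 * s).toNat v).set
              (2 * s + 1).toNat v)
          = (s0 ++ [v, v]) ++ List.replicate (2 * cs.length) 0 := by
        rw [hrep, h2s, h2s1]
        have e1 : (s0 ++ 0 :: 0 :: List.replicate (2 * cs.length) (0:Int)).set s0.length v
            = s0 ++ v :: 0 :: List.replicate (2 * cs.length) 0 := by
          simp
        have e2 : (s0 ++ v :: 0 :: List.replicate (2 * cs.length) (0:Int)).set (s0.length + 1) v
            = s0 ++ v :: v :: List.replicate (2 * cs.length) 0 := by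
          rw [show s0.length + 1 = (s0 ++ [v]).length by simp,
              show s0 ++ v :: 0 :: List.replicate (2 * cs.length) (0:Int)
                = (s0 ++ [v]) ++ 0 :: List.replicate (2 * cs.length) 0 by simp]
          simp
        rw [e1, e2]; simp
      rw [hset]
      have hih := ih (s + 1) (k + 1) (s0 ++ [v, v]) (by omega) (by simp [hlen]; omega)
      rw [hih, sign_flip, ← hv]
      simp [sinalRec, hc]
    · rw [show zposI s (c :: cs) = zposI (s + 1) cs by simp [zposI, hc]]
      have hassoc : s0 ++ List.replicate (2 * (c :: cs).length) (0 : Int)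
          = (s0 ++ [0, 0]) ++ List.replicate (2 * cs.length) 0 := by
        rw [hrep]; simp
      rw [hassoc]
      have hih := ih (s + 1) k (s0 ++ [(0:Int), 0]) (by omega) (by simp [hlen]; omega)
      rw [hih]
      simp [sinalRec, hc]

-- ===== VERDICT (by name: the statement is the Claim_ definition above) =====
theorem pseudoternario_spec : Claim_equal_pseudoternario := by
  unfold Claim_equal_pseudoternario Spec_pseudoternario
  intro bits _
  unfold pseudoternario pseudoternario_alt
  have hA := foldA_eq bits.toList [] [] 1 0
  have hT : (List.range bits.toList.length).flatMap (fun (t : Nat) => [(t : Int), (t : Int) + 1])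
      = tempoN 0 bits.toList.length := by
    have h := tempoB_eq bits.toList.length 0
    have hf : (fun (i : Nat) => [(0 : Int) + (i : Int), (0 : Int) + (i : Int) + 1])
        = (fun (t : Nat) => [(t : Int), (t : Int) + 1]) := by
      funext a; simp
    rw [hf] at h
    exact h
  have hZ := zerosB_eq bits.toList 0
  have hF := fillB_eq bits.toList 0 0 [] (by omega) (by simp)
  simp only []
  rw [hZ]
  refine Prod.ext ?_ ?_
  · simp only [hA.1, hT, List.nil_append]
  · simp only [hA.2]
    simpa using hF.symm
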